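-- pv_equiv track=rewrite | github.com/alex-stoneman/SchoolFolder | Computing/Lessons/Year12/myCipher.py | indentify_order
-- ===== SOURCE A (Python) =====
-- from operator import itemgetter
--
-- def indentify_order(word):
--     order = []
--     numbered = []
--     for letter in word:
--         order.append([letter, ord(letter)])
--     order = sorted(order, key=itemgetter(1))
--     for letter in word:
--         numbered.append(order.index([letter, ord(letter)]))
--     return numbered
-- ===== SOURCE B (Python) =====
-- def indentify_order(word):
--     counts = [0] * 256
--     for c in word:
--         counts[ord(c)] += 1
--     return [sum(counts[:ord(c)]) for c in word]
-- ===== Notes on version B (the rewrite author's own statement) =====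
-- stated objective: faster
-- what changed: Eliminates sorting entirely: a 256-bucket character histogram is built in one pass and each letter's rank is the sum of the buckets below its code (counting-sort rank), instead of A's sort plus per-letter linear .index scan.
import Mathlib
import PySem

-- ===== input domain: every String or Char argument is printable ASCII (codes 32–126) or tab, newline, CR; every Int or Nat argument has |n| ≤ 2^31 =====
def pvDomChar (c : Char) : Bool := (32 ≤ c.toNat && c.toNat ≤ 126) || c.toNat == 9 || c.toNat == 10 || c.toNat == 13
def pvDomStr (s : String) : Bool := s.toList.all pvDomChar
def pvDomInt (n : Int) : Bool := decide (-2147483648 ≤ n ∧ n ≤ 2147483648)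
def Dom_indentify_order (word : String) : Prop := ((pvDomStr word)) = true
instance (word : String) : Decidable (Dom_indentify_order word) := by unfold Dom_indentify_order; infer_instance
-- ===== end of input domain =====

-- B eliminates sorting entirely: a 256-bucket character histogram plus bucket-prefix sums
-- give each letter's rank directly (counting-sort rank) instead of A's sort + .index scans.

-- ===== PORT A =====
-- order.index(...) can never raise here (the pair is always in the sorted list), so the
-- .getD 0 default of the index? port is unreachable.
def indentify_order (word : String) : List Int :=
  let order : List (Char × Int) :=
    word.toList.foldl (fun acc letter => acc ++ [(letter, (letter.toNat : Int))]) []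
  let order := PySem.List.sorted order (fun p => p.2) false
  word.toList.foldl (fun acc letter =>
    acc ++ [(((PySem.List.index? order (letter, (letter.toNat : Int))).getD 0 : Nat) : Int)]) []

-- ===== PORT B =====
-- counts[ord(c)] += 1: on Dom every code point is < 256, so the read (getD) and the
-- List.set write are always in range and exact for Python's list indexing.
def indentify_order_alt (word : String) : List Int :=
  let counts : List Int :=
    word.toList.foldl (fun a c => a.set c.toNat (a.getD c.toNat 0 + 1)) (List.replicate 256 0)
  word.toList.map (fun c => (PySem.List.slice counts none (some (c.toNat : Int))).sum)

-- ===== PRECONDITION & SPEC =====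
def Spec_indentify_order (word : String) (out : List Int) : Prop := out = indentify_order_alt word
instance (word : String) (out : List Int) : Decidable (Spec_indentify_order word out) := by unfold Spec_indentify_order; infer_instance

-- ===== CLAIM (what is proved, stated in full; the proofs are below) =====
def Claim_equal_indentify_order : Prop := ∀ (word : String), Dom_indentify_order word → Spec_indentify_order word (indentify_order word)

-- ===== LEMMAS AND PROOFS =====

-- In a list sorted by `key`, where everything sharing v's key IS v, the first index of v
-- is the number of elements with strictly smaller key.
lemma index?_sorted_eq_countP {α : Type} [BEq α] [LawfulBEq α] {κ : Type} [LinearOrder κ]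
    (key : α → κ) (l : List α) (hs : l.Pairwise (fun a b => key a ≤ key b))
    (v : α) (hv : v ∈ l) (heq : ∀ x ∈ l, key x = key v → x = v) :
    PySem.List.index? l v = some (l.countP (fun x => decide (key x < key v))) := by
  induction l with
  | nil => cases hv
  | cons a t ih =>
    rcases List.pairwise_cons.mp hs with ⟨ha, ht⟩
    by_cases hav : a = v
    · subst hav
      rw [PySem.List.index?_cons_self]
      have h0 : (a :: t).countP (fun x => decide (key x < key a)) = 0 := by
        apply List.countP_eq_zero.mpr
        intro x hx
        simp only [decide_eq_true_eq, not_lt]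
        rcases List.mem_cons.mp hx with h | h
        · exact le_of_eq (by rw [h])
        · exact ha x h
      rw [h0]
    · have hvt : v ∈ t := by
        rcases List.mem_cons.mp hv with h | h
        · exact absurd h.symm hav
        · exact h
      have hka : key a ≠ key v := fun h => hav (heq a List.mem_cons_self h)
      have hkalt : key a < key v := lt_of_le_of_ne (ha v hvt) hka
      rw [PySem.List.index?_cons_of_ne t hav, ih ht hvt
        (fun x hx h => heq x (List.mem_cons_of_mem a hx) h)]
      simp [hkalt, Nat.add_comm]

lemma char_eq_of_toNat_eq {x c : Char} (h : x.toNat = c.toNat) : x = c := by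
  apply Char.ext
  apply UInt32.toBitVec_inj.mp
  apply BitVec.toNat_inj.mp
  exact h

-- A's value at letter c: #{d ∈ word : ord d < ord c}.
lemma a_value (wl : List Char) (c : Char) (hc : c ∈ wl) :
    PySem.List.index?
        (PySem.List.sorted (wl.map (fun d => (d, (d.toNat : Int)))) (fun p => p.2) false)
        (c, (c.toNat : Int))
      = some (wl.countP (fun d => decide (d.toNat < c.toNat))) := by
  have hperm := PySem.List.sorted_perm (wl.map (fun d => (d, (d.toNat : Int)))) (fun p => p.2) false
  rw [index?_sorted_eq_countP (fun p : Char × Int => p.2) _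
      (PySem.List.sorted_pairwise (wl.map (fun d => (d, (d.toNat : Int)))) (fun p : Char × Int => p.2))
      (c, (c.toNat : Int))
      (by rw [PySem.List.mem_sorted]; exact List.mem_map.mpr ⟨c, hc, rfl⟩)
      (by
        intro x hx hkey
        rw [PySem.List.mem_sorted] at hx
        rcases List.mem_map.mp hx with ⟨d, _, rfl⟩
        simp only at hkey
        have : d.toNat = c.toNat := by exact_mod_cast hkey
        rw [char_eq_of_toNat_eq this])]
  rw [hperm.countP_eq, List.countP_map]
  congr 1
  apply List.countP_congr
  intro d _
  simp only [Function.comp_apply, decide_eq_true_eq]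
  exact Int.ofNat_lt

-- The histogram fold preserves length.
lemma hist_length (wl : List Char) (a : List Int) :
    (wl.foldl (fun a c => a.set c.toNat (a.getD c.toNat 0 + 1)) a).length = a.length := by
  induction wl generalizing a with
  | nil => rfl
  | cons c t ih => rw [List.foldl_cons, ih, List.length_set]

-- After the histogram fold, bucket i holds its initial value plus #{d ∈ wl : ord d = i}.
lemma hist_value (wl : List Char) (a : List Int) (i : Nat)
    (hw : ∀ d ∈ wl, d.toNat < a.length) :
    (wl.foldl (fun a c => a.set c.toNat (a.getD c.toNat 0 + 1)) a).getD i 0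
      = a.getD i 0 + ((wl.countP (fun d => d.toNat == i)) : Int) := by
  induction wl generalizing a with
  | nil => simp
  | cons c t ih =>
    have hc : c.toNat < a.length := hw c List.mem_cons_self
    rw [List.foldl_cons, ih _ (by intro d hd; rw [List.length_set]; exact hw d (List.mem_cons_of_mem c hd))]
    rw [List.countP_cons]
    by_cases hci : c.toNat = i
    · subst hci
      rw [List.getD_eq_getElem?_getD, List.getElem?_set_self (by omega),
          List.getD_eq_getElem?_getD, List.getElem?_eq_getElem hc]
      simp
      ring
    · rw [List.getD_eq_getElem?_getD, List.getElem?_set_ne (by omega),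
          ← List.getD_eq_getElem?_getD]
      simp [hci]

-- Splitting a strict-bound count at its boundary.
lemma countP_lt_succ (wl : List Char) (k : Nat) :
    wl.countP (fun d => decide (d.toNat < k + 1))
      = wl.countP (fun d => decide (d.toNat < k)) + wl.countP (fun d => d.toNat == k) := by
  induction wl with
  | nil => rfl
  | cons c t ih =>
    simp only [List.countP_cons, ih]
    by_cases h1 : c.toNat < k
    · simp [h1, Nat.lt_succ_of_lt h1, Nat.ne_of_lt h1]
      omega
    · by_cases h2 : c.toNat = k
      · simp [h2]
        omega
      · have : ¬ c.toNat < k + 1 := by omega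
        simp [h1, h2, this]

-- Sum of the first k buckets = #{d ∈ wl : ord d < k}.
lemma take_hist_sum (wl : List Char) (cs : List Int) (k : Nat) (hk : k ≤ cs.length)
    (hcs : ∀ i, i < cs.length → cs.getD i 0 = ((wl.countP (fun d => d.toNat == i)) : Int)) :
    (cs.take k).sum = ((wl.countP (fun d => decide (d.toNat < k))) : Int) := by
  induction k with
  | zero => simp
  | succ n ih =>
    have hn : n < cs.length := by omega
    rw [List.take_add_one, List.sum_append, ih (by omega), List.getElem?_eq_getElem hn]
    simp only [Option.toList_some, List.sum_cons, List.sum_nil, add_zero]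
    have := hcs n hn
    rw [List.getD_eq_getElem?_getD, List.getElem?_eq_getElem hn, Option.getD_some] at this
    rw [this, countP_lt_succ]
    push_cast
    ring

-- B's value at letter c: the same count.
lemma b_value (wl : List Char) (c : Char) (hdom : ∀ d ∈ wl, d.toNat < 256) (hc : c.toNat < 256) :
    (PySem.List.slice
        (wl.foldl (fun a c => a.set c.toNat (a.getD c.toNat 0 + 1)) (List.replicate 256 (0:Int)))
        none (some (c.toNat : Int))).sum
      = ((wl.countP (fun d => decide (d.toNat < c.toNat))) : Int) := by
  rw [PySem.List.slice_to_natCast]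
  apply take_hist_sum
  · rw [hist_length, List.length_replicate]; omega
  · intro i hi
    rw [hist_length, List.length_replicate] at hi
    rw [hist_value wl _ i (by intro d hd; rw [List.length_replicate]; exact hdom d hd)]
    have hz : (List.replicate 256 (0:Int)).getD i 0 = 0 := List.getD_replicate (0:Int) hi
    rw [hz, zero_add]

-- ===== VERDICT (by name: the statement is the Claim_ definition above) =====
theorem indentify_order_spec : Claim_equal_indentify_order := by
  intro word hdom
  unfold Spec_indentify_order indentify_order indentify_order_alt
  simp only [PySem.List.foldl_append_singleton_eq_map, List.nil_append]
  apply List.map_congr_left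
  intro c hc
  have hdom' : ∀ d ∈ word.toList, d.toNat < 256 := by
    intro d hd
    have := List.all_eq_true.mp hdom d hd
    simp only [pvDomChar, Bool.or_eq_true, Bool.and_eq_true, decide_eq_true_eq, beq_iff_eq] at this
    omega
  rw [a_value word.toList c hc, b_value word.toList c hdom' (hdom' c hc)]
  simp
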